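-- pv_equiv track=rewrite | github.com/k-the-hidden-hero/bticino_intercom | custom_components/bticino_intercom/camera.py | _fix_answer_audio_direction
-- ===== SOURCE A (Python) =====
-- def _fix_answer_audio_direction(answer_sdp: str) -> str:
--     """Rewrite audio direction in the device's answer for browser compatibility.
--
--     Applied to the device's answer BEFORE forwarding to the browser.
--     Only modifies the audio m-section; video is left unchanged.
--
--     The browser's original offer has recvonly for audio. The device may
--     respond with sendrecv ("I send and receive") or recvonly ("I receive").
--     Neither is compatible with the browser's recvonly offer — the browser
--     rejects any answer that implies receiving audio it didn't offer to send.
--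
--     Fix: force audio to sendonly in the answer, which is the only direction
--     compatible with the browser's recvonly offer per RFC 3264.
--     """
--     lines = answer_sdp.split("\r\n")
--     result = []
--     in_audio = False
--     for line in lines:
--         if line.startswith("m=audio"):
--             in_audio = True
--         elif line.startswith("m="):
--             in_audio = False
--
--         if in_audio and line in ("a=sendrecv", "a=recvonly"):
--             result.append("a=sendonly")
--         else:
--             result.append(line)
--     return "\r\n".join(result)
-- ===== SOURCE B (Python) =====
-- def _fix_answer_audio_direction(answer_sdp: str) -> str:
--     """Rewrite audio direction in the device's answer for browser compatibility.
--
--     Section-based rewrite: split the SDP into the session preamble and a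
--     list of m-sections, patch only the audio sections, and rejoin.
--     """
--     lines = answer_sdp.split("\r\n")
--     # preamble: everything before the first m= line
--     i = 0
--     while i < len(lines) and not lines[i].startswith("m="):
--         i += 1
--     preamble = lines[:i]
--     # sections: each starts at an m= line and runs to the next m= line
--     sections = []
--     while i < len(lines):
--         j = i + 1
--         while j < len(lines) and not lines[j].startswith("m="):
--             j += 1
--         sections.append(lines[i:j])
--         i = j
--     out = preamble
--     for sec in sections:
--         if sec[0].startswith("m=audio"):
--             out = out + ["a=sendonly" if l in ("a=sendrecv", "a=recvonly") else l for l in sec]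
--         else:
--             out = out + sec
--     return "\r\n".join(out)
-- ===== Notes on version B (the rewrite author's own statement) =====
-- stated objective: alternative
-- what changed: Replaces A's running in_audio flag threaded through one line-by-line loop with an explicit partition of the SDP into a preamble and m= sections, rewriting only sections whose header starts with m=audio and rejoining.
import Mathlib
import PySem

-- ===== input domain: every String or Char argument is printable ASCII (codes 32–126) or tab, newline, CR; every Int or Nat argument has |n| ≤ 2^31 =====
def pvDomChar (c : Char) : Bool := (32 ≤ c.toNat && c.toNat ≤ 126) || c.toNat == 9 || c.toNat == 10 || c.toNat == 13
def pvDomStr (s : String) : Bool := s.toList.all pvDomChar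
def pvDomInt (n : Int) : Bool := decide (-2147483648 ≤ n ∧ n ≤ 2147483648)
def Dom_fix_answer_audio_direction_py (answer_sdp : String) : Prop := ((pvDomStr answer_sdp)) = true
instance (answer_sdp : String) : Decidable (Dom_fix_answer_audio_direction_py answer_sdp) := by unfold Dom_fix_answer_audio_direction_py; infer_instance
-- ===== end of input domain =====

-- B replaces A's running in_audio flag by an explicit split into preamble and m-sections,
-- patching only the audio sections (objective: alternative decomposition, same cost).

-- ===== PORT A =====
def fix_answer_audio_direction_py (answer_sdp : String) : String :=
  let lines := (PySem.Str.split? answer_sdp "\r\n").getD []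
  let st := lines.foldl (fun (st : List String × Bool) line =>
    let in_audio :=
      if PySem.Str.startswith line "m=audio" then true
      else if PySem.Str.startswith line "m=" then false
      else st.2
    (st.1 ++ [if in_audio && (line == "a=sendrecv" || line == "a=recvonly")
              then "a=sendonly" else line], in_audio)) ([], false)
  PySem.Str.join "\r\n" st.1

-- ===== PORT B =====
def pvIsM (l : String) : Bool := PySem.Str.startswith l "m="

def pvFixLine (l : String) : String :=
  if l == "a=sendrecv" || l == "a=recvonly" then "a=sendonly" else l

-- group the remaining lines into m-sections (each starts at an m= line)
def pvSections : List String → List (List String)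
  | [] => []
  | l :: ls =>
    (l :: ls.takeWhile (fun x => !pvIsM x)) :: pvSections (ls.dropWhile (fun x => !pvIsM x))
termination_by ls => ls.length
decreasing_by
  have := List.length_dropWhile_le (p := fun x => !pvIsM x) (l := ls)
  simp; omega

def pvFixSection (sec : List String) : List String :=
  if PySem.Str.startswith (sec.headD "") "m=audio" then sec.map pvFixLine else sec

def fix_answer_audio_direction_py_alt (answer_sdp : String) : String :=
  let lines := (PySem.Str.split? answer_sdp "\r\n").getD []
  let preamble := lines.takeWhile (fun x => !pvIsM x)
  let sections := pvSections (lines.dropWhile (fun x => !pvIsM x))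
  let out := sections.foldl (fun acc sec => acc ++ pvFixSection sec) preamble
  PySem.Str.join "\r\n" out

-- ===== PRECONDITION & SPEC =====
def Spec_fix_answer_audio_direction_py (answer_sdp : String) (out : String) : Prop := out = fix_answer_audio_direction_py_alt answer_sdp
instance (answer_sdp : String) (out : String) : Decidable (Spec_fix_answer_audio_direction_py answer_sdp out) := by unfold Spec_fix_answer_audio_direction_py; infer_instance

-- ===== CLAIM (what is proved, stated in full; the proofs are below) =====
def Claim_equal_fix_answer_audio_direction_py : Prop := ∀ (answer_sdp : String), Dom_fix_answer_audio_direction_py answer_sdp → Spec_fix_answer_audio_direction_py answer_sdp (fix_answer_audio_direction_py answer_sdp)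

-- ===== LEMMAS AND PROOFS =====

-- A's loop, with the accumulator stripped off
def pvGoA : List String → Bool → List String
  | [], _ => []
  | l :: ls, f =>
    let f' := if PySem.Str.startswith l "m=audio" then true
              else if PySem.Str.startswith l "m=" then false else f
    (if f' && (l == "a=sendrecv" || l == "a=recvonly") then "a=sendonly" else l) :: pvGoA ls f'

theorem pvFoldA (lines : List String) : ∀ (acc : List String) (f : Bool),
    (lines.foldl (fun (st : List String × Bool) line =>
      let in_audio :=
        if PySem.Str.startswith line "m=audio" then true
        else if PySem.Str.startswith line "m=" then false
        else st.2
      (st.1 ++ [if in_audio && (line == "a=sendrecv" || line == "a=recvonly")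
                then "a=sendonly" else line], in_audio)) (acc, f)).1
    = acc ++ pvGoA lines f := by
  induction lines with
  | nil => intro acc f; simp [pvGoA]
  | cons l ls ih =>
    intro acc f
    simp only [List.foldl_cons, pvGoA, ih]
    simp

theorem pvStartswithM (l : String) (h : PySem.Str.startswith l "m=audio" = true) :
    PySem.Str.startswith l "m=" = true := by
  simp only [PySem.Str.startswith_eq, PySem.Chars.startswith_iff] at h ⊢
  exact List.IsPrefix.trans (by decide) h

theorem pvMain (n : Nat) : ∀ (ls : List String), ls.length ≤ n →
    pvGoA ls false = ls.takeWhile (fun x => !pvIsM x)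
        ++ (pvSections (ls.dropWhile (fun x => !pvIsM x))).flatMap pvFixSection
    ∧ pvGoA ls true = (ls.takeWhile (fun x => !pvIsM x)).map pvFixLine
        ++ (pvSections (ls.dropWhile (fun x => !pvIsM x))).flatMap pvFixSection := by
  induction n with
  | zero =>
    intro ls hls
    have : ls = [] := List.eq_nil_of_length_eq_zero (Nat.le_zero.mp hls)
    subst this
    simp [pvGoA, pvSections]
  | succ n ih =>
    intro ls hls
    match ls with
    | [] => simp [pvGoA, pvSections]
    | l :: ls =>
      simp only [List.length_cons, Nat.succ_le_succ_iff] at hls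
      by_cases hM : pvIsM l
      · -- l starts a section
        have htw : (l :: ls).takeWhile (fun x => !pvIsM x) = [] := by
          simp [hM]
        have hdw : (l :: ls).dropWhile (fun x => !pvIsM x) = l :: ls := by
          simp [hM]
        rw [htw, hdw]
        simp only [pvSections, List.flatMap_cons, List.nil_append, List.map_nil]
        by_cases hA : PySem.Str.startswith l "m=audio" = true
        · have hsec : pvFixSection (l :: ls.takeWhile (fun x => !pvIsM x))
              = pvFixLine l :: (ls.takeWhile (fun x => !pvIsM x)).map pvFixLine := by
            simp only [pvFixSection, List.headD_cons, hA, if_true, List.map_cons]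
          rw [hsec]
          constructor <;>
          · simp only [pvGoA, hA, if_true, Bool.true_and]
            rw [(ih ls hls).2]
            simp [pvFixLine]
        · have hA' : PySem.Str.startswith l "m=audio" = false := by
            simpa using hA
          have hsec : pvFixSection (l :: ls.takeWhile (fun x => !pvIsM x))
              = l :: ls.takeWhile (fun x => !pvIsM x) := by
            simp only [pvFixSection, List.headD_cons, hA', Bool.false_eq_true, if_false]
          rw [hsec]
          have hM' : PySem.Str.startswith l "m=" = true := hM
          constructor <;>
          · simp only [pvGoA, hA', hM', Bool.false_eq_true, if_false, if_true, Bool.false_and]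
            rw [(ih ls hls).1]
            simp
      · -- l is in the preamble / current non-header run — but pvGoA's flag is carried through
        have hA : PySem.Str.startswith l "m=audio" = false := by
          by_contra h
          exact hM (pvStartswithM l (by simpa using h))
        have hM' : PySem.Str.startswith l "m=" = false := by
          simpa [pvIsM] using hM
        have htw : (l :: ls).takeWhile (fun x => !pvIsM x)
            = l :: ls.takeWhile (fun x => !pvIsM x) := by
          simp [hM]
        have hdw : (l :: ls).dropWhile (fun x => !pvIsM x)
            = ls.dropWhile (fun x => !pvIsM x) := by
          simp [hM]
        rw [htw, hdw]
        constructor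
        · simp only [pvGoA, hA, hM', Bool.false_eq_true, if_false, Bool.false_and]
          rw [(ih ls hls).1]
          simp
        · simp only [pvGoA, hA, hM', Bool.false_eq_true, if_false, Bool.true_and]
          rw [(ih ls hls).2]
          simp [pvFixLine]

-- ===== VERDICT (by name: the statement is the Claim_ definition above) =====
theorem fix_answer_audio_direction_py_spec : Claim_equal_fix_answer_audio_direction_py := by
  intro s _
  unfold Spec_fix_answer_audio_direction_py
  simp only [fix_answer_audio_direction_py, fix_answer_audio_direction_py_alt]
  rw [pvFoldA, List.nil_append]
  congr 1
  rw [(pvMain ((PySem.Str.split? s "\r\n").getD []).length _ le_rfl).1]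
  rw [PySem.List.foldl_append_eq_flatMap]
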